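-- pv_equiv track=rewrite | github.com/Itachibx/Bypass | main.py | _normalize_methods_in_argv
-- ===== SOURCE A (Python) =====
-- def _normalize_methods_in_argv(argv: list[str]) -> list[str]:
--     out, i = [], 0
--     while i < len(argv):
--         tok = argv[i]
--         out.append(tok)
--         if tok == "--methods" and i + 1 < len(argv):
--             j, bucket = i + 1, []
--             while j < len(argv) and not argv[j].startswith("--"):
--                 bucket.append(argv[j])
--                 j += 1
--             if len(bucket) > 1:
--                 out.append(",".join(bucket))
--             elif len(bucket) == 1:
--                 out.append(bucket[0])
--             i = j
--             continue
--         i += 1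
--     return out
-- ===== SOURCE B (Python) =====
-- def _normalize_methods_in_argv(argv: list[str]) -> list[str]:
--     out = []
--     collecting = False
--     bucket = []
--     for tok in argv:
--         if collecting and not tok.startswith("--"):
--             bucket.append(tok)
--         else:
--             if bucket:
--                 out.append(",".join(bucket))
--             bucket = []
--             out.append(tok)
--             collecting = tok == "--methods"
--     if bucket:
--         out.append(",".join(bucket))
--     return out
-- ===== Notes on version B (the rewrite author's own statement) =====
-- stated objective: simpler
-- what changed: Replaced A's nested while loops with index jumping (inner loop re-scanning the bucket after each '--methods') by a single flat for-pass over argv that carries a 'collecting' flag and a bucket across iterations and flushes the comma-join at each group boundary.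
import Mathlib
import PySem

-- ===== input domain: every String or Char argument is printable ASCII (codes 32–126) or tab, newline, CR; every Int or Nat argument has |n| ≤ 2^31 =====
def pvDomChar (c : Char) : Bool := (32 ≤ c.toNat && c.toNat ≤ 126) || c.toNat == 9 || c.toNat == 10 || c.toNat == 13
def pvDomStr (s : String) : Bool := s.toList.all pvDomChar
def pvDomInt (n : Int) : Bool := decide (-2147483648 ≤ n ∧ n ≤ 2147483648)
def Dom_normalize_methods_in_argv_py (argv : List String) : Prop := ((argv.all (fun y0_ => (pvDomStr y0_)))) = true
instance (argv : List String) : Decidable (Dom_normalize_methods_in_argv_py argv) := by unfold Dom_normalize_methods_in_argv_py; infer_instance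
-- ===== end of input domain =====

-- B replaces A's nested while loops (inner bucket scan with index jumping) by a single flat
-- pass carrying a 'collecting' flag and a bucket across iterations; objective: simpler.

-- ===== PORT A =====
-- inner while loop: 'while j < len(argv) and not argv[j].startswith("--")'
-- (fuel only makes the recursion structural; with fuel ≥ len(argv) - j it never runs out)
def pvAInner (argv : List String) (fuel : Nat) (j : Nat) (bucket : List String) : Nat × List String :=
  match fuel with
  | 0 => (j, bucket)
  | f + 1 =>
    if j < argv.length ∧ ¬ PySem.Str.startswith argv[j]! "--" then
      pvAInner argv f (j + 1) (bucket ++ [argv[j]!])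
    else
      (j, bucket)

-- outer while loop of A (fuel ≥ len(argv) - i suffices: i strictly increases each iteration)
def pvALoop (argv : List String) (fuel : Nat) (i : Nat) (out : List String) : List String :=
  match fuel with
  | 0 => out
  | f + 1 =>
    if i < argv.length then
      let out' := out ++ [argv[i]!]
      if argv[i]! = "--methods" ∧ i + 1 < argv.length then
        let jb := pvAInner argv (argv.length - (i + 1)) (i + 1) []
        let out'' :=
          if jb.2.length > 1 then out' ++ [PySem.Str.join "," jb.2]
          else if jb.2.length = 1 then out' ++ [jb.2[0]!]
          else out'
        pvALoop argv f jb.1 out''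
      else
        pvALoop argv f (i + 1) out'
    else
      out

def normalize_methods_in_argv_py (argv : List String) : List String :=
  pvALoop argv argv.length 0 []

-- ===== PORT B =====
-- flush: emit the comma-join of a non-empty bucket
def pvBFlush (bucket : List String) : List String :=
  if bucket ≠ [] then [PySem.Str.join "," bucket] else []

-- the single flat for-loop of B, carrying (collecting, bucket, out)
def pvBGo (rest : List String) (collecting : Bool) (bucket out : List String) : List String :=
  match rest with
  | [] => out ++ pvBFlush bucket
  | tok :: r =>
    if collecting ∧ ¬ PySem.Str.startswith tok "--" then
      pvBGo r collecting (bucket ++ [tok]) out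
    else
      pvBGo r (tok == "--methods") [] (out ++ pvBFlush bucket ++ [tok])

def normalize_methods_in_argv_py_alt (argv : List String) : List String :=
  pvBGo argv false [] []

-- ===== PRECONDITION & SPEC =====
def Spec_normalize_methods_in_argv_py (argv : List String) (out : List String) : Prop := out = normalize_methods_in_argv_py_alt argv
instance (argv : List String) (out : List String) : Decidable (Spec_normalize_methods_in_argv_py argv out) := by unfold Spec_normalize_methods_in_argv_py; infer_instance

-- ===== CLAIM (what is proved, stated in full; the proofs are below) =====
def Claim_equal_normalize_methods_in_argv_py : Prop := ∀ (argv : List String), Dom_normalize_methods_in_argv_py argv → Spec_normalize_methods_in_argv_py argv (normalize_methods_in_argv_py argv)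

-- ===== LEMMAS AND PROOFS =====

-- when B is collecting and the next token (if any) stops the group, flushing now equals
-- continuing with the pending bucket
theorem pvBGo_flush (rest : List String) (bucket out : List String)
    (hstop : rest = [] ∨ PySem.Str.startswith rest.head! "--") :
    pvBGo rest true bucket out = pvBGo rest false [] (out ++ pvBFlush bucket) := by
  cases rest with
  | nil => simp [pvBGo, pvBFlush]
  | cons t r =>
    rcases hstop with h | h
    · simp at h
    · simp at h
      simp [pvBGo, h, pvBFlush]

-- stepping B through A's inner loop: B accumulates exactly A's bucket, and the inner
-- loop stops at the end or at a '--' token (given enough fuel)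
theorem pvBGo_inner (argv : List String) (fuel j : Nat) (bucket out : List String)
    (hj : j ≤ argv.length) (hf : argv.length ≤ j + fuel) :
    pvBGo (argv.drop j) true bucket out
      = pvBGo (argv.drop (pvAInner argv fuel j bucket).1) true (pvAInner argv fuel j bucket).2 out
    ∧ j ≤ (pvAInner argv fuel j bucket).1
    ∧ (pvAInner argv fuel j bucket).1 ≤ argv.length
    ∧ ((pvAInner argv fuel j bucket).1 = argv.length
        ∨ PySem.Str.startswith argv[(pvAInner argv fuel j bucket).1]! "--") := by
  induction fuel generalizing j bucket with
  | zero =>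
    -- no fuel: then j = argv.length already
    have hje : j = argv.length := by omega
    exact ⟨rfl, le_refl _, hj, Or.inl hje⟩
  | succ f ih =>
    rw [pvAInner]
    by_cases hc : j < argv.length ∧ ¬ PySem.Str.startswith argv[j]! "--"
    · obtain ⟨h1, h2⟩ := hc
      rw [if_pos ⟨h1, h2⟩]
      have H := ih (j + 1) (bucket ++ [argv[j]!]) (by omega) (by omega)
      have hdrop : argv.drop j = argv[j]! :: argv.drop (j + 1) := by
        rw [List.getElem!_eq_getElem?_getD, List.getElem?_eq_getElem h1]
        exact List.drop_eq_getElem_cons h1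
      refine ⟨?_, by omega, H.2.2.1, H.2.2.2⟩
      rw [hdrop]
      have hstep : pvBGo (argv[j]! :: argv.drop (j + 1)) true bucket out
          = pvBGo (argv.drop (j + 1)) true (bucket ++ [argv[j]!]) out := by
        simp only [pvBGo]
        split_ifs with hc'
        · rfl
        · exact absurd ⟨trivial, h2⟩ hc'
      rw [hstep]
      exact H.1
    · rw [if_neg hc]
      refine ⟨rfl, le_refl _, hj, ?_⟩
      by_cases hlt : j < argv.length
      · right
        have h2 := not_and.mp hc hlt
        simpa using h2
      · left; omega

-- join of a single string is that string (Source B's flush vs A's len==1 branch)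
theorem pvJoin_singleton (s : String) : PySem.Str.join "," [s] = s := by
  simp [PySem.Str.join, PySem.Chars.join_singleton]

-- A's emit rules coincide with B's flush
theorem pvFlush_cases (bucket : List String) :
    (if bucket.length > 1 then [PySem.Str.join "," bucket]
     else if bucket.length = 1 then [bucket[0]!] else []) = pvBFlush bucket := by
  match bucket with
  | [] => simp [pvBFlush]
  | [s] => simp [pvBFlush, pvJoin_singleton]
  | a :: b :: r => simp [pvBFlush]

-- main loop invariant: A's outer loop from index i (with enough fuel) equals B's flat pass
-- over the suffix with an empty bucket and collecting off
theorem pvLoop_eq (argv : List String) (fuel i : Nat) (out : List String)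
    (hf : argv.length ≤ i + fuel) :
    pvALoop argv fuel i out = pvBGo (argv.drop i) false [] out := by
  induction fuel generalizing i out with
  | zero =>
    have hnil : argv.drop i = [] := List.drop_eq_nil_of_le (by omega)
    simp [pvALoop, hnil, pvBGo, pvBFlush]
  | succ f ih =>
    rw [pvALoop]
    by_cases h : i < argv.length
    · rw [if_pos h]
      have hdrop : argv.drop i = argv[i]! :: argv.drop (i + 1) := by
        rw [List.getElem!_eq_getElem?_getD, List.getElem?_eq_getElem h]
        exact List.drop_eq_getElem_cons h
      have hstep : pvBGo (argv[i]! :: argv.drop (i + 1)) false [] out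
          = pvBGo (argv.drop (i + 1)) (argv[i]! == "--methods") [] (out ++ [argv[i]!]) := by
        simp [pvBGo, pvBFlush]
      by_cases htok : argv[i]! = "--methods" ∧ i + 1 < argv.length
      · -- '--methods' with a following token: A runs the inner loop
        obtain ⟨ht', hnext⟩ := htok
        rw [if_pos ⟨ht', hnext⟩]
        set jb := pvAInner argv (argv.length - (i + 1)) (i + 1) [] with hjb
        have hinner := pvBGo_inner argv (argv.length - (i + 1)) (i + 1) []
          (out ++ ["--methods"]) (by omega) (by omega)
        rw [← hjb] at hinner
        rw [ih _ _ (by omega : argv.length ≤ jb.1 + f)]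
        symm
        rw [hdrop, hstep, ht']
        have hbeq : ("--methods" == "--methods") = true := by decide
        rw [hbeq, hinner.1]
        have hstop : argv.drop jb.1 = [] ∨ PySem.Str.startswith (argv.drop jb.1).head! "--" := by
          rcases hinner.2.2.2 with he | hs
          · left; rw [he]; simp
          · by_cases hlt : jb.1 < argv.length
            · right
              have hg : argv[jb.1]! = argv[jb.1] := by
                simp [List.getElem!_eq_getElem?_getD, List.getElem?_eq_getElem hlt]
              rw [List.drop_eq_getElem_cons hlt,
                show (argv[jb.1] :: List.drop (jb.1 + 1) argv).head! = argv[jb.1] from rfl, ← hg]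
              exact hs
            · left
              have : jb.1 = argv.length := by have := hinner.2.2.1; omega
              rw [this]; simp
        rw [pvBGo_flush _ _ _ hstop]
        have hout : (if jb.2.length > 1 then (out ++ ["--methods"]) ++ [PySem.Str.join "," jb.2]
              else if jb.2.length = 1 then (out ++ ["--methods"]) ++ [jb.2[0]!]
              else out ++ ["--methods"])
            = (out ++ ["--methods"]) ++ pvBFlush jb.2 := by
          rw [← pvFlush_cases jb.2]
          split_ifs with h1 h2
          · rfl
          · rfl
          · simp
        rw [hout]
      · -- ordinary token (not '--methods', or '--methods' as the last token)
        rw [if_neg htok]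
        rw [ih _ _ (by omega)]
        symm
        rw [hdrop, hstep]
        by_cases hm : argv[i]! = "--methods"
        · -- then i + 1 ≥ len: the suffix after tok is empty, both sides are out ++ [tok]
          have hlen : ¬ i + 1 < argv.length := fun hc => htok ⟨hm, hc⟩
          have hnil : argv.drop (i + 1) = [] := List.drop_eq_nil_of_le (by omega)
          rw [hnil]
          simp [pvBGo, pvBFlush, hm]
        · have hbeq : (argv[i]! == "--methods") = false := by simpa using hm
          rw [hbeq]
    · rw [if_neg h]
      have hnil : argv.drop i = [] := List.drop_eq_nil_of_le (by omega)
      simp [hnil, pvBGo, pvBFlush]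

-- ===== VERDICT (by name: the statement is the Claim_ definition above) =====
theorem normalize_methods_in_argv_py_spec : Claim_equal_normalize_methods_in_argv_py := by
  intro argv _
  unfold Spec_normalize_methods_in_argv_py normalize_methods_in_argv_py normalize_methods_in_argv_py_alt
  simpa using pvLoop_eq argv argv.length 0 [] (by omega)
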